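-- pv_equiv track=rewrite | github.com/mod96/hiddenlayer | CodingTestExamples/Basic_Algorithms/Heap/Heap 3 - revisited.py | solution
-- ===== SOURCE A (Python) =====
-- from collections import deque
-- import heapq
--
-- def solution(jobs):
--     l=len(jobs)
--     jobs=deque(sorted( [(job[1],job[0]) for job in jobs],key=lambda tup:(tup[1],tup[0]) ))
--     ans=0
--     while jobs:
--         empty_in=jobs.popleft()
--         t1=empty_in[1]
--         t2=t1+empty_in[0]
--         ans+=empty_in[0]
--         waiting=[]
--         while jobs and jobs[0][1]<=t2:
--             heapq.heappush(waiting,jobs.popleft())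
--         while waiting:
--             next_tup=heapq.heappop(waiting)
--             t2+=next_tup[0]
--             ans+=t2-next_tup[1]
--             while jobs and jobs[0][1] <= t2:
--                 heapq.heappush(waiting, jobs.popleft())
--
--     return ans//l
-- ===== SOURCE B (Python) =====
-- def solution(jobs):
--     # SJF scheduling with plain list scans: no sort, no deque, no heap.
--     n = len(jobs)
--     pending = [(job[0], job[1]) for job in jobs]   # (arrival, duration), not yet arrived
--     pool = []                                      # (duration, arrival), arrived & waiting
--     t = 0
--     ans = 0
--     for _ in range(n):
--         if pool:
--             d, a = min(pool)                       # shortest job first, ties by arrival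
--             pool.remove((d, a))
--             t += d
--         else:
--             a, d = min(pending)                    # idle: jump to the earliest job
--             pending.remove((a, d))
--             t = a + d
--         ans += t - a
--         pool += [(d2, a2) for a2, d2 in pending if a2 <= t]
--         pending = [p for p in pending if p[0] > t]
--     return ans // n
-- ===== Notes on version B (the rewrite author's own statement) =====
-- stated objective: simpler
-- what changed: replaces the sort + deque + heap event simulation by a plain n-round loop over two unsorted lists (pending/arrived) that picks each round's job with a linear min scan and absorbs new arrivals after each completion
import Mathlib
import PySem

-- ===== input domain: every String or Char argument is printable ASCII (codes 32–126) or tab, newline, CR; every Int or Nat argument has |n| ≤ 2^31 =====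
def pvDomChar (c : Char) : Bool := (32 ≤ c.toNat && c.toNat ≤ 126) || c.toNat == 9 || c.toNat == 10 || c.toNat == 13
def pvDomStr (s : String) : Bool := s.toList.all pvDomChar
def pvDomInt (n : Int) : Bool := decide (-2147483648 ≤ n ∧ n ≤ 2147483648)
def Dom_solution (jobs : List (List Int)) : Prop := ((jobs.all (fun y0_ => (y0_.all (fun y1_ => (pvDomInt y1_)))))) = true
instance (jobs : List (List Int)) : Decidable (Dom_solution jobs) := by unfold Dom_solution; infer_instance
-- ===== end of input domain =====

-- B replaces A's sort + deque + heap event simulation by an n-round loop over two unsorted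
-- lists with linear min scans (simpler; no speed claim).

-- ===== PORT A =====
-- A's deque holds (duration, arrival) pairs; Python's tuple comparison is the
-- lexicographic order, rendered exactly as `toLex` into `Int ×ₗ Int`.
-- Both while-loops are ported with a fuel argument that merely totalizes them: the
-- callers pass enough fuel for the loop to run to completion (proved below).

-- `while jobs and jobs[0][1] <= t2: heapq.heappush(waiting, jobs.popleft())`
def fillA : List (Int × Int) → Int → List (Int × Int) → List (Int × Int) × List (Int × Int)
  | [], _, w => ([], w)
  | (d, a) :: js, t2, w =>
    if a ≤ t2 then fillA js t2 (w ++ [(d, a)]) else ((d, a) :: js, w)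

-- the minimum tuple of a list, as returned by Python's min() and heapq.heappop
def popMin (w : List (Int × Int)) : Int × Int :=
  (PySem.List.min? w (fun p => toLex p)).getD (0, 0)

-- `while waiting:` — heapq modelled as a pop-min priority queue: heappop removes the first
-- occurrence of the minimum tuple; exact because Python tuple comparison is a total order,
-- so heappop always returns the minimum value of the waiting multiset.
def innerA : Nat → List (Int × Int) → List (Int × Int) → Int → Int → List (Int × Int) × Int × Int
  | 0, js, _, t2, ans => (js, t2, ans)
  | _ + 1, js, [], t2, ans => (js, t2, ans)
  | fuel + 1, js, x :: xs, t2, ans =>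
    let m := popMin (x :: xs)
    let w1 := (x :: xs).erase m
    let t2' := t2 + m.1
    let ans' := ans + t2' - m.2
    let p := fillA js t2' w1
    innerA fuel p.1 p.2 t2' ans'

-- `while jobs:` (outer loop; each iteration pops the head of the sorted deque)
def outerA : Nat → List (Int × Int) → Int → Int
  | 0, _, ans => ans
  | _ + 1, [], ans => ans
  | fuel + 1, (d, a) :: rest, ans =>
    let t2 := a + d
    let ans1 := ans + d
    let p := fillA rest t2 []
    let q := innerA (p.1.length + p.2.length) p.1 p.2 t2 ans1
    outerA fuel q.1 q.2.2

def solution (jobs : List (List Int)) : Int :=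
  let l := PySem.List.len jobs
  let js := PySem.List.sorted
    (jobs.map (fun job => (PySem.List.pyGetD job 1 0, PySem.List.pyGetD job 0 0)))
    (fun tup => toLex (tup.2, tup.1))
  PySem.Int.floordiv (outerA js.length js 0) l

-- ===== PORT B =====
-- pending holds (arrival, duration); pool holds (duration, arrival); Python's min() on
-- tuples is the lexicographic minimum (popMin); list.remove drops the first occurrence of
-- the minimum just returned by min(), which is List.erase of it.
def loopB : Nat → List (Int × Int) → List (Int × Int) → Int → Int → Int
  | 0, _, _, _, ans => ans
  | k + 1, pending, pool, t, ans =>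
    match pool with
    | y :: ys =>
      let m := popMin (y :: ys)
      let pool1 := (y :: ys).erase m
      let t' := t + m.1
      let ans' := ans + t' - m.2
      loopB k (pending.filter (fun p => decide (t' < p.1)))
        (pool1 ++ (pending.filter (fun p => decide (p.1 ≤ t'))).map (fun p => (p.2, p.1)))
        t' ans'
    | [] =>
      let m := popMin pending
      let pending1 := pending.erase m
      let t' := m.1 + m.2
      let ans' := ans + t' - m.1
      loopB k (pending1.filter (fun p => decide (t' < p.1)))
        ((pending1.filter (fun p => decide (p.1 ≤ t'))).map (fun p => (p.2, p.1)))
        t' ans'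

def solution_alt (jobs : List (List Int)) : Int :=
  let n := jobs.length
  let pending := jobs.map (fun job => (PySem.List.pyGetD job 0 0, PySem.List.pyGetD job 1 0))
  PySem.Int.floordiv (loopB n pending [] 0 0) (PySem.List.len jobs)

-- ===== PRECONDITION & SPEC =====
-- Pre_ excludes exactly the inputs where the Python A raises: the empty list
-- (ZeroDivisionError in `ans//l`) and jobs with fewer than two fields (IndexError);
-- B raises on the same inputs.
def Pre_solution (jobs : List (List Int)) : Prop :=
  jobs ≠ [] ∧ ∀ job ∈ jobs, 2 ≤ job.length
instance (jobs : List (List Int)) : Decidable (Pre_solution jobs) := by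
  unfold Pre_solution; infer_instance

def pvWitness_solution : List (List Int) := [[0, 3], [1, 9], [2, 6]]

def Spec_solution (jobs : List (List Int)) (out : Int) : Prop := out = solution_alt jobs
instance (jobs : List (List Int)) (out : Int) : Decidable (Spec_solution jobs out) := by unfold Spec_solution; infer_instance

-- ===== CLAIM (what is proved, stated in full; the proofs are below) =====
def Claim_equal_solution : Prop := ∀ (jobs : List (List Int)), Dom_solution jobs → Pre_solution jobs → Spec_solution jobs (solution jobs)

-- ===== LEMMAS AND PROOFS =====

-- swap of a pair: the bridge between A's (duration, arrival) and B's (arrival, duration)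
def swapP (p : Int × Int) : Int × Int := (p.2, p.1)

theorem fillA_len (js : List (Int × Int)) (t2 : Int) (w : List (Int × Int)) :
    (fillA js t2 w).1.length + (fillA js t2 w).2.length = js.length + w.length := by
  induction js generalizing w with
  | nil => simp [fillA]
  | cons x xs ih =>
    obtain ⟨d, a⟩ := x
    simp only [fillA]
    split
    · rw [ih]; simp; omega
    · simp

theorem popMin_mem (x : Int × Int) (xs : List (Int × Int)) : popMin (x :: xs) ∈ x :: xs := by
  unfold popMin
  cases h : PySem.List.min? (x :: xs) (fun p => toLex p) with
  | none => exact absurd ((PySem.List.min?_eq_none_iff _ _).mp h) (by simp)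
  | some m => simpa using PySem.List.min?_mem h

theorem innerA_nil (fi : Nat) (js : List (Int × Int)) (t ans : Int) :
    innerA fi js [] t ans = (js, t, ans) := by
  cases fi <;> rfl

theorem outerA_nil (fo : Nat) (ans : Int) : outerA fo [] ans = ans := by
  cases fo <;> rfl

theorem swap_swap_list (l : List (Int × Int)) : (l.map swapP).map swapP = l := by
  rw [List.map_map]
  have : (swapP ∘ swapP) = id := by funext p; simp [swapP]
  rw [this, List.map_id]

theorem min?_klex_eq_of_perm {l1 l2 : List (Int × Int)} (h : l1.Perm l2) :
    PySem.List.min? l1 (fun p => toLex p) = PySem.List.min? l2 (fun p => toLex p) := by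
  cases h1 : PySem.List.min? l1 (fun p => toLex p) with
  | none =>
    have : l1 = [] := (PySem.List.min?_eq_none_iff _ _).mp h1
    subst this
    rw [(PySem.List.min?_eq_none_iff _ _).mpr h.symm.eq_nil]
  | some m1 =>
    cases h2 : PySem.List.min? l2 (fun p => toLex p) with
    | none =>
      have : l2 = [] := (PySem.List.min?_eq_none_iff _ _).mp h2
      subst this
      rw [(PySem.List.min?_eq_none_iff _ _).mpr h.eq_nil] at h1
      exact h1.symm ▸ rfl
    | some m2 =>
      have hm1 := PySem.List.min?_mem h1
      have hm2 := PySem.List.min?_mem h2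
      have hle1 := PySem.List.min?_isMin h1 m2 (h.mem_iff.mpr hm2)
      have hle2 := PySem.List.min?_isMin h2 m1 (h.mem_iff.mp hm1)
      exact congrArg some (toLex.injective (le_antisymm hle1 hle2))

theorem popMin_eq_of_perm {l1 l2 : List (Int × Int)} (h : l1.Perm l2) :
    popMin l1 = popMin l2 := by
  unfold popMin
  rw [min?_klex_eq_of_perm h]

theorem fst_le_of_klex_le {x y : Int × Int}
    (h : toLex ((x.2 : Int), (x.1 : Int)) ≤ toLex ((y.2 : Int), (y.1 : Int))) : x.2 ≤ y.2 := by
  rcases Prod.Lex.le_iff.mp h with h1 | ⟨h1, _⟩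
  · exact le_of_lt h1
  · exact le_of_eq h1

-- on a deque sorted by (arrival, duration), the arrival-≤ prefix is the arrival-≤ subset
theorem sorted_take_drop (t : Int) : ∀ js : List (Int × Int),
    js.Pairwise (fun x y => toLex ((x.2 : Int), (x.1 : Int)) ≤ toLex ((y.2 : Int), (y.1 : Int))) →
    js.takeWhile (fun p => decide (p.2 ≤ t)) = js.filter (fun p => decide (p.2 ≤ t)) ∧
    js.dropWhile (fun p => decide (p.2 ≤ t)) = js.filter (fun p => decide (t < p.2)) := by
  intro js hs
  induction js with
  | nil => simp
  | cons x xs ih =>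
    rw [List.pairwise_cons] at hs
    obtain ⟨hx, hxs⟩ := hs
    obtain ⟨ih1, ih2⟩ := ih hxs
    by_cases hxt : x.2 ≤ t
    · constructor
      · simp [hxt, ih1]
      · simp [hxt, ih2, not_lt.mpr hxt]
    · have hall : ∀ y ∈ xs, t < y.2 := fun y hy =>
        lt_of_lt_of_le (not_le.mp hxt) (fst_le_of_klex_le (hx y hy))
      have hnil : List.filter (fun p => decide (p.2 ≤ t)) xs = [] :=
        List.filter_eq_nil_iff.mpr (fun y hy => by simpa using not_le.mpr (hall y hy))
      have hself : List.filter (fun p => decide (t < p.2)) xs = xs :=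
        List.filter_eq_self.mpr (fun y hy => by simpa using hall y hy)
      constructor
      · simp [hxt, hnil]
      · simp [hxt, not_le.mp hxt, hself]

theorem fillA_spec (t : Int) : ∀ (js w : List (Int × Int)),
    fillA js t w = (js.dropWhile (fun p => decide (p.2 ≤ t)),
                    w ++ js.takeWhile (fun p => decide (p.2 ≤ t))) := by
  intro js
  induction js with
  | nil => simp [fillA]
  | cons x xs ih =>
    intro w
    obtain ⟨d, a⟩ := x
    simp only [fillA]
    split
    · next hat => rw [ih]; simp [hat]
    · next hat => simp [hat]

-- the head of the sorted deque is Python's min() of B's pending list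
theorem popMin_pend_head {hd : Int × Int} {rest pend : List (Int × Int)}
    (hs : (hd :: rest).Pairwise (fun x y => toLex ((x.2 : Int), (x.1 : Int)) ≤ toLex ((y.2 : Int), (y.1 : Int))))
    (hp : ((hd :: rest).map swapP).Perm pend) :
    popMin pend = swapP hd := by
  rw [popMin_eq_of_perm hp.symm]
  unfold popMin
  cases hm : PySem.List.min? ((hd :: rest).map swapP) (fun p => toLex p) with
  | none =>
    have := (PySem.List.min?_eq_none_iff _ _).mp hm
    simp at this
  | some m =>
    have hmem := PySem.List.min?_mem hm
    have hle1 := PySem.List.min?_isMin hm (swapP hd)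
      (List.mem_map_of_mem (by simp : hd ∈ hd :: rest))
    simp only [List.mem_map] at hmem
    obtain ⟨y, hy, rfl⟩ := hmem
    have hle2 : toLex (swapP hd) ≤ toLex (swapP y) := by
      rcases List.mem_cons.mp hy with rfl | hy'
      · exact le_refl _
      · exact (List.pairwise_cons.mp hs).1 y hy'
    simp only [Option.getD_some]
    exact toLex.injective (le_antisymm hle1 hle2)

theorem map_swap_filter_le (t : Int) (js : List (Int × Int)) :
    (js.filter (fun p => decide (p.2 ≤ t))).map swapP
      = ((js.map swapP).filter (fun p => decide (p.1 ≤ t))) := by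
  rw [List.filter_map]
  congr 1

theorem map_swap_filter_gt (t : Int) (js : List (Int × Int)) :
    (js.filter (fun p => decide (t < p.2))).map swapP
      = ((js.map swapP).filter (fun p => decide (t < p.1))) := by
  rw [List.filter_map]
  congr 1

theorem filter_le_perm {js pend : List (Int × Int)} (h : (js.map swapP).Perm pend) (t : Int) :
    (js.filter (fun p => decide (p.2 ≤ t))).Perm
      ((pend.filter (fun p => decide (p.1 ≤ t))).map swapP) := by
  have h2 := (h.filter (fun p => decide (p.1 ≤ t))).map swapP
  rw [← map_swap_filter_le, swap_swap_list] at h2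
  exact h2

theorem filter_gt_perm {js pend : List (Int × Int)} (h : (js.map swapP).Perm pend) (t : Int) :
    ((js.filter (fun p => decide (t < p.2))).map swapP).Perm
      (pend.filter (fun p => decide (t < p.1))) := by
  rw [map_swap_filter_gt]
  exact h.filter _

theorem sim (k : Nat) : ∀ (fi fo : Nat) (js w pend pool : List (Int × Int)) (t ans : Int),
    js.Pairwise (fun x y => toLex ((x.2 : Int), (x.1 : Int)) ≤ toLex ((y.2 : Int), (y.1 : Int))) →
    (js.map swapP).Perm pend → w.Perm pool →
    js.length + w.length = k → k ≤ fi → k ≤ fo →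
    outerA fo (innerA fi js w t ans).1 (innerA fi js w t ans).2.2 = loopB k pend pool t ans := by
  induction k with
  | zero =>
    intro fi fo js w pend pool t ans _ hjp hwp hlen _ _
    have hjs : js = [] := List.length_eq_zero_iff.mp (by omega)
    have hw : w = [] := List.length_eq_zero_iff.mp (by omega)
    subst hjs; subst hw
    rw [innerA_nil]
    show outerA fo [] ans = _
    rw [outerA_nil, loopB]
  | succ k ih =>
    intro fi fo js w pend pool t ans hs hjp hwp hlen hfi hfo
    cases w with
    | cons x xs =>
      cases pool with
      | nil => exact absurd hwp.eq_nil (by simp)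
      | cons y ys =>
        cases fi with
        | zero => omega
        | succ fi' =>
          have hmm : popMin (y :: ys) = popMin (x :: xs) := popMin_eq_of_perm hwp.symm
          show outerA fo (innerA fi' (fillA js (t + (popMin (x :: xs)).1) ((x :: xs).erase (popMin (x :: xs)))).1
              (fillA js (t + (popMin (x :: xs)).1) ((x :: xs).erase (popMin (x :: xs)))).2
              (t + (popMin (x :: xs)).1)
              (ans + (t + (popMin (x :: xs)).1) - (popMin (x :: xs)).2)).1
            (innerA fi' (fillA js (t + (popMin (x :: xs)).1) ((x :: xs).erase (popMin (x :: xs)))).1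
              (fillA js (t + (popMin (x :: xs)).1) ((x :: xs).erase (popMin (x :: xs)))).2
              (t + (popMin (x :: xs)).1)
              (ans + (t + (popMin (x :: xs)).1) - (popMin (x :: xs)).2)).2.2 = _
          simp only [loopB, hmm]
          have hlen1 := fillA_len js (t + (popMin (x :: xs)).1) ((x :: xs).erase (popMin (x :: xs)))
          have hlen2 := List.length_erase_of_mem (popMin_mem x xs)
          rw [fillA_spec]
          obtain ⟨htw, hdw⟩ := sorted_take_drop (t + (popMin (x :: xs)).1) js hs
          rw [htw, hdw]
          apply ih
          · exact List.Pairwise.sublist List.filter_sublist hs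
          · exact filter_gt_perm hjp _
          · exact List.Perm.append (hwp.erase _) (filter_le_perm hjp _)
          · rw [fillA_spec, htw, hdw] at hlen1
            simp only [List.length_append, List.length_cons] at *
            omega
          · omega
          · omega
    | nil =>
      have hpool : pool = [] := hwp.symm.eq_nil
      subst hpool
      cases js with
      | nil => simp at hlen
      | cons hd rest =>
        obtain ⟨d, a⟩ := hd
        cases fo with
        | zero => simp at hfo
        | succ fo' =>
          rw [innerA_nil]
          show outerA (fo' + 1) ((d, a) :: rest) ans = _
          show outerA fo'
              (innerA ((fillA rest (a + d) []).1.length + (fillA rest (a + d) []).2.length)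
                (fillA rest (a + d) []).1 (fillA rest (a + d) []).2 (a + d) (ans + d)).1
              (innerA ((fillA rest (a + d) []).1.length + (fillA rest (a + d) []).2.length)
                (fillA rest (a + d) []).1 (fillA rest (a + d) []).2 (a + d) (ans + d)).2.2 = _
          simp only [loopB, popMin_pend_head hs hjp]
          have hsrest : rest.Pairwise (fun x y => toLex ((x.2 : Int), (x.1 : Int)) ≤ toLex ((y.2 : Int), (y.1 : Int))) :=
            (List.pairwise_cons.mp hs).2
          have hrest : (rest.map swapP).Perm (pend.erase (swapP (d, a))) := by
            have h1 := hjp.erase (swapP (d, a))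
            rw [show (((d, a) :: rest).map swapP) = (swapP (d, a) :: rest.map swapP) from rfl,
              List.erase_cons_head] at h1
            exact h1
          have hlen1 := fillA_len rest (a + d) []
          rw [fillA_spec]
          obtain ⟨htw, hdw⟩ := sorted_take_drop (a + d) rest hsrest
          rw [htw, hdw]
          have e1 : (swapP ((d : Int), (a : Int))).1 + (swapP ((d : Int), (a : Int))).2 = a + d := rfl
          have e2 : ans + ((a : Int) + d) - (swapP ((d : Int), (a : Int))).1 = ans + d := by
            simp [swapP]; ring
          rw [e1, e2]
          apply ih
          · exact List.Pairwise.sublist List.filter_sublist hsrest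
          · exact filter_gt_perm hrest _
          · rw [List.nil_append]
            exact filter_le_perm hrest _
          · rw [fillA_spec, htw, hdw] at hlen1
            simp only [List.length_cons, List.length_nil, List.nil_append] at *
            omega
          · rw [fillA_spec, htw, hdw] at hlen1
            simp only [List.length_cons, List.length_nil, List.nil_append] at *
            omega
          · omega

theorem solution_spec' (jobs : List (List Int)) : solution jobs = solution_alt jobs := by
  unfold solution solution_alt
  simp only
  congr 1
  have hperm : ((PySem.List.sorted
      (jobs.map (fun job => (PySem.List.pyGetD job 1 0, PySem.List.pyGetD job 0 0)))
      (fun tup => toLex ((tup.2 : Int), (tup.1 : Int)))).map swapP).Perm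
      (jobs.map (fun job => (PySem.List.pyGetD job 0 0, PySem.List.pyGetD job 1 0))) := by
    have h1 := PySem.List.sorted_perm
      (jobs.map (fun job => (PySem.List.pyGetD job 1 0, PySem.List.pyGetD job 0 0)))
      (fun tup => toLex ((tup.2 : Int), (tup.1 : Int))) false
    have h2 := h1.map swapP
    rw [List.map_map] at h2
    exact h2
  have hlen : (PySem.List.sorted
      (jobs.map (fun job => (PySem.List.pyGetD job 1 0, PySem.List.pyGetD job 0 0)))
      (fun tup => toLex ((tup.2 : Int), (tup.1 : Int)))).length = jobs.length := by
    rw [PySem.List.length_sorted, List.length_map]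
  have hinner := sim jobs.length
    (PySem.List.sorted
      (jobs.map (fun job => (PySem.List.pyGetD job 1 0, PySem.List.pyGetD job 0 0)))
      (fun tup => toLex ((tup.2 : Int), (tup.1 : Int)))).length
    (PySem.List.sorted
      (jobs.map (fun job => (PySem.List.pyGetD job 1 0, PySem.List.pyGetD job 0 0)))
      (fun tup => toLex ((tup.2 : Int), (tup.1 : Int)))).length
    (PySem.List.sorted
      (jobs.map (fun job => (PySem.List.pyGetD job 1 0, PySem.List.pyGetD job 0 0)))
      (fun tup => toLex ((tup.2 : Int), (tup.1 : Int))))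
    [] (jobs.map (fun job => (PySem.List.pyGetD job 0 0, PySem.List.pyGetD job 1 0))) [] 0 0
    (PySem.List.sorted_pairwise _ _) hperm (List.Perm.refl _)
    (by simp [hlen]) (by omega) (by omega)
  rw [innerA_nil] at hinner
  exact hinner

-- ===== VERDICT (by name: the statement is the Claim_ definition above) =====
theorem solution_spec : Claim_equal_solution := by
  intro jobs _ _
  exact solution_spec' jobs
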